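-- pv_equiv track=rewrite | github.com/Shinipsae/CosPro | Test/test05.py | solution6
-- ===== SOURCE A (Python) =====
-- def solution6(down, up):
--     answer = 0
--     passenger = 0
--     n = len(down)
--     for i in range(n):
--         passenger += up[i] - down[i]
--         stand = passenger - 240
--         if stand < 0:
--             stand = 0
--         if stand > 0 and stand > answer:
--             answer = stand
--     return answer
-- ===== SOURCE B (Python) =====
-- def solution6(down, up):
--     # Backward suffix recurrence: peak = max prefix sum of the suffix starting at i
--     # (peak(i) = max(0, diff[i] + peak(i+1))); the answer is that peak clamped past 240.
--     peak = 0
--     for i in range(len(down) - 1, -1, -1):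
--         peak = max(0, up[i] - down[i] + peak)
--     return max(0, peak - 240)
-- ===== Notes on version B (the rewrite author's own statement) =====
-- stated objective: alternative
-- what changed: Replaces A's forward fused loop (running passenger count, per-step clamp at 240, running max) by a backward suffix recurrence peak = max(0, diff[i] + peak) that directly computes the maximum prefix sum with a single clamped accumulator, clamping past 240 once at the end.
import Mathlib
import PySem

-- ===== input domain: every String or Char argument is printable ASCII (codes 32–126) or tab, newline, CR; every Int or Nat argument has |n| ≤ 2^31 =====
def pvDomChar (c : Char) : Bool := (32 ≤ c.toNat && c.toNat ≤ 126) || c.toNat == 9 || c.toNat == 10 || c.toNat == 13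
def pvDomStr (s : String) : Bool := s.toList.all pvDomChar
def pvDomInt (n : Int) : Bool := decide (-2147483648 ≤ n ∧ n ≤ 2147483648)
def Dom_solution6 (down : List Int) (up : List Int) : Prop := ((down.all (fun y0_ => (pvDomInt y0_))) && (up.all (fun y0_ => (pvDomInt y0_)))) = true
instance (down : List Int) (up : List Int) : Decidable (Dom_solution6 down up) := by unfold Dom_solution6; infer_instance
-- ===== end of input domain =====

-- B replaces A's forward fused loop by a backward suffix recurrence
-- peak = max(0, diff[i] + peak), clamping past 240 once at the end.


-- ===== PORT A =====
def solution6 (down : List Int) (up : List Int) : Int :=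
  ((PySem.List.pyRange 0 (PySem.List.len down)).foldl
    (fun (st : Int × Int) i =>
      let passenger := st.2 + (PySem.List.pyGetD up i 0 - PySem.List.pyGetD down i 0)
      let stand := passenger - 240
      let stand := if stand < 0 then 0 else stand
      let answer := if stand > 0 ∧ stand > st.1 then stand else st.1
      (answer, passenger))
    (0, 0)).1

-- ===== PORT B =====
def solution6_alt (down : List Int) (up : List Int) : Int :=
  let peak := (PySem.List.pyRange (PySem.List.len down - 1) (-1) (-1)).foldl
    (fun peak i => max 0 (PySem.List.pyGetD up i 0 - PySem.List.pyGetD down i 0 + peak)) 0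
  max 0 (peak - 240)

-- ===== PRECONDITION & SPEC =====
-- Pre_ excludes exactly the inputs where Python A raises IndexError (up shorter than down).
def Pre_solution6 (down : List Int) (up : List Int) : Prop := down.length ≤ up.length
instance (down : List Int) (up : List Int) : Decidable (Pre_solution6 down up) := by unfold Pre_solution6; infer_instance
def pvWitness_solution6 : List Int × List Int := ([100, 5], [300, 7])
def Spec_solution6 (down : List Int) (up : List Int) (out : Int) : Prop := out = solution6_alt down up
instance (down : List Int) (up : List Int) (out : Int) : Decidable (Spec_solution6 down up out) := by unfold Spec_solution6; infer_instance

-- ===== CLAIM (what is proved, stated in full; the proofs are below) =====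
def Claim_equal_solution6 : Prop := ∀ (down : List Int) (up : List Int), Dom_solution6 down up → Pre_solution6 down up → Spec_solution6 down up (solution6 down up)

-- ===== LEMMAS AND PROOFS =====

-- maximum prefix sum (including the empty prefix) of a list, by the suffix recurrence
def pvPeak : List Int → Int
  | [] => 0
  | x :: xs => max 0 (x + pvPeak xs)

theorem pvPeak_nonneg : ∀ (l : List Int), 0 ≤ pvPeak l
  | [] => le_refl 0
  | _ :: _ => le_max_left 0 _

-- prefix sums of l starting from running total t
def pvPrefs : List Int → Int → List Int
  | [], _ => []
  | x :: xs, t => (t + x) :: pvPrefs xs (t + x)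

-- A's index loop reading two lists is the fold over their zip
theorem pv_fold_range_two {S : Type} (g : S → Int → Int → S) :
    ∀ (d u : List Int), d.length ≤ u.length → ∀ (st : S),
      (List.range d.length).foldl (fun st k => g st (d.getD k 0) (u.getD k 0)) st
        = (d.zip u).foldl (fun st p => g st p.1 p.2) st := by
  intro d
  induction d with
  | nil => intro u _ st; simp
  | cons a d' ih =>
    intro u hu st
    cases u with
    | nil => simp at hu
    | cons b u' =>
      simp only [List.length_cons, List.range_succ_eq_map, List.foldl_cons, List.foldl_map,
        List.getD_cons_zero, List.getD_cons_succ, List.zip_cons_cons]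
      exact ih u' (by simpa using hu) (g st a b)

-- A's loop: the answer component is a fold of clamped prefix sums
theorem pv_loopA :
    ∀ (l : List (Int × Int)) (ans pass : Int), 0 ≤ ans →
      ((l.foldl (fun (st : Int × Int) p =>
          (if (0 < if st.2 + (p.2 - p.1) - 240 < 0 then 0 else st.2 + (p.2 - p.1) - 240) ∧
                (st.1 < if st.2 + (p.2 - p.1) - 240 < 0 then 0 else st.2 + (p.2 - p.1) - 240)
            then if st.2 + (p.2 - p.1) - 240 < 0 then 0 else st.2 + (p.2 - p.1) - 240
            else st.1,
           st.2 + (p.2 - p.1))) (ans, pass)).1)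
        = (pvPrefs (l.map (fun p => p.2 - p.1)) pass).foldl
            (fun m t => max m (max 0 (t - 240))) ans := by
  intro l
  induction l with
  | nil => intro ans pass _; simp [pvPrefs]
  | cons p l' ih =>
    intro ans pass hans
    simp only [List.foldl_cons, List.map_cons, pvPrefs]
    rw [show (if (0 < if pass + (p.2 - p.1) - 240 < 0 then 0 else pass + (p.2 - p.1) - 240) ∧
            (ans < if pass + (p.2 - p.1) - 240 < 0 then 0 else pass + (p.2 - p.1) - 240)
          then if pass + (p.2 - p.1) - 240 < 0 then 0 else pass + (p.2 - p.1) - 240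
          else ans)
        = max ans (max 0 (pass + (p.2 - p.1) - 240)) from by split_ifs <;> omega]
    exact ih _ _ (by omega)

-- folding clamped prefix sums equals clamping the peak once
theorem pv_prefs_peak :
    ∀ (l : List Int) (t a : Int), max 0 (t - 240) ≤ a →
      (pvPrefs l t).foldl (fun m s => max m (max 0 (s - 240))) a
        = max a (max 0 (t + pvPeak l - 240)) := by
  intro l
  induction l with
  | nil => intro t a h; simp [pvPrefs, pvPeak]; omega
  | cons x xs ih =>
    intro t a h
    simp only [pvPrefs, pvPeak, List.foldl_cons]
    rw [ih (t + x) (max a (max 0 (t + x - 240))) (by omega)]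
    have hnn := pvPeak_nonneg xs
    omega

-- B's backward index loop is pvPeak of the zipped diffs
theorem pv_foldr_range_two :
    ∀ (d u : List Int), d.length ≤ u.length →
      (List.range d.length).foldr
          (fun k acc => max 0 (u.getD k 0 - d.getD k 0 + acc)) 0
        = pvPeak ((d.zip u).map (fun p => p.2 - p.1)) := by
  intro d
  induction d with
  | nil => intro u _; simp [pvPeak]
  | cons a d' ih =>
    intro u hu
    cases u with
    | nil => simp at hu
    | cons b u' =>
      simp only [List.length_cons, List.range_succ_eq_map, List.foldr_cons, List.foldr_map,
        List.getD_cons_zero, List.getD_cons_succ, List.zip_cons_cons, List.map_cons, pvPeak]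
      rw [ih u' (by simpa using hu)]

-- ===== VERDICT (by name: the statement is the Claim_ definition above) =====
theorem solution6_spec : Claim_equal_solution6 := by
  intro down up _ hpre
  unfold Spec_solution6 solution6 solution6_alt
  -- B side: countdown range = reversed ascending range; foldl over reverse = foldr
  rw [PySem.List.pyRange_neg_one_eq_reverse, List.foldl_reverse]
  have hb : PySem.List.pyRange (-1 + 1) (PySem.List.len down - 1 + 1) 1
      = PySem.List.pyRange 0 (PySem.List.len down) 1 := by norm_num
  rw [hb, PySem.List.pyRange_one]
  simp only [PySem.List.len, Int.sub_zero, Int.toNat_natCast, List.foldl_map, List.foldr_map,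
    PySem.List.pyGetD_natCast, zero_add]
  rw [pv_fold_range_two (fun (st : Int × Int) dval uval =>
      (if (0 < if st.2 + (uval - dval) - 240 < 0 then 0 else st.2 + (uval - dval) - 240) ∧
            (st.1 < if st.2 + (uval - dval) - 240 < 0 then 0 else st.2 + (uval - dval) - 240)
        then if st.2 + (uval - dval) - 240 < 0 then 0 else st.2 + (uval - dval) - 240
        else st.1,
       st.2 + (uval - dval))) down up hpre (0, 0)]
  rw [pv_loopA (down.zip up) 0 0 le_rfl]
  rw [pv_prefs_peak _ 0 0 (by omega)]
  rw [pv_foldr_range_two down up hpre]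
  omega
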